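-- pv_equiv track=rewrite | github.com/Roxabi/roxabi-plugins | plugins/web-intel/scripts/_shared/validators_ssrf.py | is_blocked_hostname
-- ===== SOURCE A (Python) =====
-- BLOCKED_HOSTNAMES = frozenset(
--     [
--         "localhost",
--         "localhost.localdomain",
--         "127.0.0.1",
--         "0.0.0.0",
--         "::1",
--         "[::1]",
--         # AWS metadata endpoints
--         "169.254.169.254",
--         "metadata.google.internal",
--         "metadata",
--         # Common internal hostnames
--         "internal",
--         "local",
--         "corp",
--         "intranet",
--     ]
-- )
--
-- def is_blocked_hostname(hostname: str) -> bool: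
--     """
--     Check if a hostname is in the blocked list.
--
--     Args:
--         hostname: Hostname to check
--
--     Returns:
--         True if hostname is blocked
--     """
--     hostname_lower = hostname.lower().strip()
--
--     # Direct match
--     if hostname_lower in BLOCKED_HOSTNAMES:
--         return True
--
--     # Check if it ends with a blocked pattern
--     for blocked in BLOCKED_HOSTNAMES:
--         if hostname_lower.endswith(f".{blocked}"):
--             return True
--
--     return False
-- ===== SOURCE B (Python) =====
-- BLOCKED_HOSTNAMES = frozenset(
--     [
--         "localhost",
--         "localhost.localdomain",
--         "127.0.0.1",
--         "0.0.0.0",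
--         "::1",
--         "[::1]",
--         "169.254.169.254",
--         "metadata.google.internal",
--         "metadata",
--         "internal",
--         "local",
--         "corp",
--         "intranet",
--     ]
-- )
--
--
-- def is_blocked_hostname(hostname: str) -> bool:
--     hostname_lower = hostname.lower().strip()
--     parts = hostname_lower.split('.')
--     for i in range(len(parts)):
--         if '.'.join(parts[i:]) in BLOCKED_HOSTNAMES:
--             return True
--     return False
-- ===== Notes on version B (the rewrite author's own statement) =====
-- stated objective: idiomatic
-- what changed: B iterates over the dot-suffixes of the hostname (re-joining the tail segments at each split point) with O(1) frozenset membership tests, instead of scanning the whole blocked-pattern list with endswith.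
import Mathlib
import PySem

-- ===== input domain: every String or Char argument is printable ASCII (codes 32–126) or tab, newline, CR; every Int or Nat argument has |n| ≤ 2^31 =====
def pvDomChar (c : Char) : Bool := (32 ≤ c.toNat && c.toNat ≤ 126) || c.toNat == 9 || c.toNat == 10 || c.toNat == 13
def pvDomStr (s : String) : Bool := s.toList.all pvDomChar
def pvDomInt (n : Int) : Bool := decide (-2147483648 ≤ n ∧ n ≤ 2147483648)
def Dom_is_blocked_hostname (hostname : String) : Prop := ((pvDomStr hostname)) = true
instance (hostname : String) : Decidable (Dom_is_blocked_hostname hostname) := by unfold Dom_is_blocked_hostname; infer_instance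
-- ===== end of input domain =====

-- B checks each dot-suffix of the hostname against the blocked set instead of scanning the
-- pattern list with endswith (idiomatic suffix-walk; same results, proved equal for all strings).

-- ===== PORT A =====
-- the module constant BLOCKED_HOSTNAMES (a frozenset of string literals); A only tests
-- membership and iterates it where the result is order-independent (any endswith hit)
def pvBlocked : List (List Char) :=
  ["localhost".toList, "localhost.localdomain".toList, "127.0.0.1".toList,
   "0.0.0.0".toList, "::1".toList, "[::1]".toList, "169.254.169.254".toList,
   "metadata.google.internal".toList, "metadata".toList, "internal".toList,
   "local".toList, "corp".toList, "intranet".toList]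

def is_blocked_hostname (hostname : String) : Bool :=
  let hostname_lower := PySem.Chars.strip (PySem.Chars.lower hostname.toList)
  if pvBlocked.contains hostname_lower then true
  else pvBlocked.any (fun blocked => PySem.Chars.endswith hostname_lower ('.' :: blocked))

-- ===== PORT B =====
def is_blocked_hostname_alt (hostname : String) : Bool :=
  let hostname_lower := PySem.Chars.strip (PySem.Chars.lower hostname.toList)
  let parts := PySem.Chars.splitOn hostname_lower ['.']
  (List.range parts.length).any
    (fun i => pvBlocked.contains (PySem.Chars.join ['.'] (parts.drop i)))

-- ===== PRECONDITION & SPEC =====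
def Spec_is_blocked_hostname (hostname : String) (out : Bool) : Prop := out = is_blocked_hostname_alt hostname
instance (hostname : String) (out : Bool) : Decidable (Spec_is_blocked_hostname hostname out) := by unfold Spec_is_blocked_hostname; infer_instance

-- ===== CLAIM (what is proved, stated in full; the proofs are below) =====
def Claim_equal_is_blocked_hostname : Prop := ∀ (hostname : String), Dom_is_blocked_hostname hostname → Spec_is_blocked_hostname hostname (is_blocked_hostname hostname)

-- ===== LEMMAS AND PROOFS =====
-- mySplit is a clean structural characterisation of Python's s.split('.') (PySem.Chars.splitOn · ['.'])

def mySplit : List Char → List (List Char)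
  | [] => [[]]
  | c :: rest =>
    if c = '.' then [] :: mySplit rest
    else (c :: (mySplit rest).headI) :: (mySplit rest).tail

lemma mySplit_cons_reconstruct (s : List Char) :
    mySplit s = (mySplit s).headI :: (mySplit s).tail := by
  cases s with
  | nil => rfl
  | cons c rest => simp only [mySplit]; split <;> simp

lemma mySplit_ne_nil (s : List Char) : mySplit s ≠ [] := by
  rw [mySplit_cons_reconstruct]; simp

lemma go_spec' : ∀ (fuel : Nat) (l cur : List Char) (acc : List (List Char)),
    l.length < fuel →
    PySem.Chars.splitOn.go ['.'] fuel l cur acc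
      = acc.reverse ++ (cur.reverse ++ (mySplit l).headI) :: (mySplit l).tail := by
  intro fuel
  induction fuel with
  | zero => intro l cur acc h; omega
  | succ n ih =>
    intro l cur acc h
    cases l with
    | nil => simp [PySem.Chars.splitOn.go, mySplit]
    | cons c rest =>
      rw [PySem.Chars.splitOn.go]
      by_cases hc : c = '.'
      · subst hc
        have hpre : List.isPrefixOf ['.'] ('.' :: rest) = true := by simp [List.isPrefixOf]
        simp only [hpre, List.length_cons, if_true]
        rw [ih _ _ _ (by simp at h ⊢; omega)]
        simp [mySplit, (mySplit_cons_reconstruct rest).symm]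
      · have hpre : List.isPrefixOf ['.'] (c :: rest) = false := by
          simp [List.isPrefixOf]; exact fun h' => hc h'.symm
        simp only [hpre]
        rw [if_neg (by simp)]
        rw [ih _ _ _ (by simp at h ⊢; omega)]
        simp [mySplit, hc]

lemma splitOn_eq_mySplit (s : List Char) : PySem.Chars.splitOn s ['.'] = mySplit s := by
  rw [PySem.Chars.splitOn, go_spec' _ _ _ _ (by omega)]
  simp
  exact (mySplit_cons_reconstruct s).symm

-- join over append with both sides nonempty
lemma join_append (as bs : List (List Char)) (ha : as ≠ []) (hb : bs ≠ []) :
    PySem.Chars.join ['.'] (as ++ bs)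
      = PySem.Chars.join ['.'] as ++ '.' :: PySem.Chars.join ['.'] bs := by
  induction as with
  | nil => exact absurd rfl ha
  | cons a as' ih =>
    cases as' with
    | nil =>
      cases bs with
      | nil => exact absurd rfl hb
      | cons b bs' => simp [PySem.Chars.join_cons_cons, PySem.Chars.join_singleton]
    | cons a2 as'' =>
      have := ih (by simp)
      simp only [List.cons_append] at *
      rw [PySem.Chars.join_cons_cons, this, PySem.Chars.join_cons_cons]
      simp

lemma join_cons_head (c : Char) (h : List Char) (t : List (List Char)) :
    PySem.Chars.join ['.'] ((c :: h) :: t) = c :: PySem.Chars.join ['.'] (h :: t) := by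
  cases t with
  | nil => simp [PySem.Chars.join_singleton]
  | cons b t' => rw [PySem.Chars.join_cons_cons, PySem.Chars.join_cons_cons]; simp

lemma join_mySplit (s : List Char) : PySem.Chars.join ['.'] (mySplit s) = s := by
  induction s with
  | nil => simp [mySplit, PySem.Chars.join_singleton]
  | cons c rest ih =>
    by_cases hc : c = '.'
    · subst hc
      rw [mySplit, if_pos rfl, mySplit_cons_reconstruct rest, PySem.Chars.join_cons_cons,
          ← mySplit_cons_reconstruct rest, ih]
      simp
    · rw [mySplit, if_neg hc, join_cons_head, ← mySplit_cons_reconstruct rest, ih]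

lemma mySplit_append (x b : List Char) :
    mySplit (x ++ '.' :: b) = mySplit x ++ mySplit b := by
  induction x with
  | nil => simp [mySplit]
  | cons c x' ih =>
    by_cases hc : c = '.'
    · subst hc; simp [mySplit, ih]
    · simp only [List.cons_append, mySplit, if_neg hc, ih]
      rw [mySplit_cons_reconstruct x']
      simp

lemma main_eq (hl : List Char) :
    (if pvBlocked.contains hl then true
     else pvBlocked.any (fun b => PySem.Chars.endswith hl ('.' :: b)))
    = (List.range (mySplit hl).length).any
        (fun i => pvBlocked.contains (PySem.Chars.join ['.'] ((mySplit hl).drop i))) := by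
  have hpos : 0 < (mySplit hl).length := List.length_pos_iff.mpr (mySplit_ne_nil hl)
  rw [Bool.eq_iff_iff]
  simp only [List.any_eq_true, List.mem_range, List.contains_iff_mem,
    PySem.Chars.endswith_iff, Bool.ite_eq_true_distrib, if_true_left]
  constructor
  · intro h
    by_cases hmem0 : hl ∈ pvBlocked
    · exact ⟨0, hpos, by simpa [join_mySplit hl] using hmem0⟩
    · obtain ⟨b, hbS, t, ht⟩ := h hmem0
      subst ht
      rw [mySplit_append t b]
      refine ⟨(mySplit t).length, ?_, ?_⟩
      · have := List.length_pos_iff.mpr (mySplit_ne_nil b)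
        simp; omega
      · rw [List.drop_left, join_mySplit b]; exact hbS
  · rintro ⟨i, hi, hmem⟩ hnot
    rcases Nat.eq_zero_or_pos i with hz | hip
    · subst hz
      exact absurd (by simpa [join_mySplit hl] using hmem) hnot
    · refine ⟨PySem.Chars.join ['.'] ((mySplit hl).drop i), hmem,
        PySem.Chars.join ['.'] ((mySplit hl).take i), ?_⟩
      have htake : (mySplit hl).take i ≠ [] := by
        simp only [ne_eq, List.take_eq_nil_iff]
        push Not
        exact ⟨by omega, mySplit_ne_nil hl⟩
      have hdrop : (mySplit hl).drop i ≠ [] := by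
        simp only [ne_eq, List.drop_eq_nil_iff]
        omega
      have := join_append _ _ htake hdrop
      rw [List.take_append_drop] at this
      rw [← this, join_mySplit hl]

theorem is_blocked_hostname_spec : Claim_equal_is_blocked_hostname := by
  intro hostname _
  show is_blocked_hostname hostname = is_blocked_hostname_alt hostname
  simp only [is_blocked_hostname, is_blocked_hostname_alt, splitOn_eq_mySplit]
  exact main_eq _
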